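-- pv_equiv track=rewrite | github.com/antonioroddev/Uri | 2724.py | verifica_quimicos
-- ===== SOURCE A (Python) =====
-- def verifica_quimicos(lista,string):
--     var = 0
--
--     for i in range(len(string)):
--         for d in lista:
--
--             if len(d) + var  < len(string):
--                 if string[i:len(d) + var] == d and  60 <= ord(string[len(d) + var]) <= 90:
--                     return True
--             else:
--                 if string[i:len(d) + var] == d:
--                     return True
--         var += 1
--
--     return False
-- ===== SOURCE B (Python) =====
-- def verifica_quimicos(lista, string):
--     # Per-pattern substring tests: a match "counts" when it is followed by a
--     # char with ord in [60, 90], or ends exactly at the end of the string.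
--     terminators = [chr(k) for k in range(60, 91)]
--     for d in lista:
--         if d and string.endswith(d):
--             return True
--         for c in terminators:
--             if d + c in string:
--                 return True
--     return False
-- ===== Notes on version B (the rewrite author's own statement) =====
-- stated objective: simpler
-- what changed: Replaces the position-by-position loop with hand-rolled slice comparisons by per-pattern substring tests: a pattern counts iff the string ends with it (nonempty) or pattern+terminator occurs as a substring for some terminator char with ord in [60,90].
import Mathlib
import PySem

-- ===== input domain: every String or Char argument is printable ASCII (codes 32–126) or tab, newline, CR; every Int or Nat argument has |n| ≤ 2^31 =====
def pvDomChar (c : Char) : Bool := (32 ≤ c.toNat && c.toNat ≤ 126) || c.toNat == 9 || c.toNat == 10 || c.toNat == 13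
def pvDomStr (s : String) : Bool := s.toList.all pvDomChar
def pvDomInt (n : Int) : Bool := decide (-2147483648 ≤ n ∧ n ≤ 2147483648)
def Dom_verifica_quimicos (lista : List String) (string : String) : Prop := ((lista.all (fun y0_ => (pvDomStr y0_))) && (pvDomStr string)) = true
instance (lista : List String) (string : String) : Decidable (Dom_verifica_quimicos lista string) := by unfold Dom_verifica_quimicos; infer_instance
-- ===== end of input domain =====

-- B replaces A's position loop by per-pattern substring tests (endswith / 'd+c in string'); same return value, objective: simpler.
-- ===== PORT A =====
-- inner 'for d in lista' loop with early return; i is the current index, var the running counter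
def vqInnerA (string : String) (i var : Int) : List String → Bool
  | [] => false
  | d :: ds =>
    if PySem.Str.len d + var < PySem.Str.len string then
      if PySem.Str.slice string (some i) (some (PySem.Str.len d + var)) == d
          && (match PySem.Str.pyGet? string (PySem.Str.len d + var) with
              -- ord(string[len(d)+var]); the index is < len(string) here, so Python never raises
              | some c => decide (60 ≤ c.toNat) && decide (c.toNat ≤ 90)
              | none => false)
      then true else vqInnerA string i var ds
    else
      if PySem.Str.slice string (some i) (some (PySem.Str.len d + var)) == d
      then true else vqInnerA string i var ds

-- outer 'for i in range(len(string))' loop, threading 'var += 1'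
def vqOuterA (lista : List String) (string : String) (var : Int) : List Int → Bool
  | [] => false
  | i :: is => if vqInnerA string i var lista then true else vqOuterA lista string (var + 1) is

def verifica_quimicos (lista : List String) (string : String) : Bool :=
  vqOuterA lista string 0 (PySem.List.pyRange 0 (PySem.Str.len string) 1)

-- ===== PORT B =====
-- [chr(k) for k in range(60, 91)]
def vqTerminators : List Char :=
  (PySem.List.pyRange 60 91 1).map (fun k => Char.ofNat k.toNat)

-- inner 'for c in terminators' loop
def vqTermLoop (string d : String) : List Char → Bool
  | [] => false
  | c :: cs =>
    if PySem.Str.isIn (d ++ String.singleton c) string then true else vqTermLoop string d cs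

-- outer 'for d in lista' loop
def vqOuterB (string : String) : List String → Bool
  | [] => false
  | d :: ds =>
    if d ≠ "" && PySem.Str.endswith string d then true
    else if vqTermLoop string d vqTerminators then true
    else vqOuterB string ds

def verifica_quimicos_alt (lista : List String) (string : String) : Bool :=
  vqOuterB string lista

-- ===== PRECONDITION & SPEC =====
def Spec_verifica_quimicos (lista : List String) (string : String) (out : Bool) : Prop := out = verifica_quimicos_alt lista string
instance (lista : List String) (string : String) (out : Bool) : Decidable (Spec_verifica_quimicos lista string out) := by unfold Spec_verifica_quimicos; infer_instance

-- ===== CLAIM (what is proved, stated in full; the proofs are below) =====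
def Claim_equal_verifica_quimicos : Prop := ∀ (lista : List String) (string : String), Dom_verifica_quimicos lista string → Spec_verifica_quimicos lista string (verifica_quimicos lista string)

-- ===== LEMMAS AND PROOFS =====

-- the condition the inner A-loop tests for one pattern d (verbatim from vqInnerA's body)
def condA (string : String) (i var : Int) (d : String) : Bool :=
  if PySem.Str.len d + var < PySem.Str.len string then
    PySem.Str.slice string (some i) (some (PySem.Str.len d + var)) == d
      && (match PySem.Str.pyGet? string (PySem.Str.len d + var) with
          | some c => decide (60 ≤ c.toNat) && decide (c.toNat ≤ 90)
          | none => false)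
  else
    PySem.Str.slice string (some i) (some (PySem.Str.len d + var)) == d

-- semantic meaning of one "hit": d occurs at i and ends at the end of the string or is
-- followed by a char with code in [60, 90]
def AGood (cs d : List Char) (i : Nat) : Prop :=
  d <+: cs.drop i ∧
    (i + d.length = cs.length ∨
      ∃ c, cs[i + d.length]? = some c ∧ 60 ≤ c.toNat ∧ c.toNat ≤ 90)

lemma vqInnerA_cons (string : String) (i var : Int) (d : String) (ds : List String) :
    vqInnerA string i var (d :: ds) = (condA string i var d || vqInnerA string i var ds) := by
  conv_lhs => rw [vqInnerA]
  unfold condA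
  split_ifs <;> simp_all

lemma vqInnerA_iff (string : String) (i var : Int) (l : List String) :
    vqInnerA string i var l = true ↔ ∃ d ∈ l, condA string i var d = true := by
  induction l with
  | nil => simp [vqInnerA]
  | cons d ds ih => rw [vqInnerA_cons]; simp [ih]

lemma prefix_snoc_iff (l m : List Char) (c : Char) :
    l ++ [c] <+: m ↔ l <+: m ∧ m[l.length]? = some c := by
  constructor
  · rintro ⟨t, ht⟩
    subst ht
    refine ⟨⟨c :: t, by simp⟩, ?_⟩
    rw [List.append_assoc]
    rw [List.getElem?_append_right (by omega)]
    simp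
  · rintro ⟨⟨t, ht⟩, hg⟩
    subst ht
    rw [List.getElem?_append_right (by omega)] at hg
    simp at hg
    cases t with
    | nil => simp at hg
    | cons x xs =>
      simp at hg
      subst hg
      exact ⟨xs, by simp⟩

lemma condA_iff (string d : String) (i : Nat) (hi : i < string.toList.length) :
    condA string (i : Int) (i : Int) d = true ↔ AGood string.toList d.toList i := by
  have hlen : PySem.Str.len d + (i : Int) = ((d.toList.length + i : Nat) : Int) := by
    rw [PySem.Str.len_eq]; push_cast; ring
  have hslice : (PySem.Str.slice string (some (i : Int))
        (some ((d.toList.length + i : Nat) : Int)) == d) = true ↔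
      d.toList <+: string.toList.drop i := by
    rw [beq_iff_eq, String.ext_iff, PySem.Str.toList_slice, PySem.Chars.slice_eq_listSlice,
      PySem.List.slice_toNat _ (by positivity) (by positivity)]
    simp only [Int.toNat_natCast, Nat.add_sub_cancel]
    rw [eq_comm, List.prefix_iff_eq_take]
  unfold condA AGood
  rw [hlen]
  split_ifs with h
  · have hlt : d.toList.length + i < string.toList.length := by
      rw [PySem.Str.len_eq] at h; exact_mod_cast h
    have hg : PySem.Str.pyGet? string ((d.toList.length + i : Nat) : Int) =
        some (string.toList[d.toList.length + i]) := by
      rw [PySem.Str.pyGet?_natCast]; exact List.getElem?_eq_getElem hlt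
    rw [Bool.and_eq_true, hslice, hg]
    constructor
    · rintro ⟨hpre, hc⟩
      simp only [Bool.and_eq_true, decide_eq_true_eq] at hc
      refine ⟨hpre, Or.inr ⟨string.toList[d.toList.length + i], ?_, hc.1, hc.2⟩⟩
      rw [Nat.add_comm i]
      exact List.getElem?_eq_getElem hlt
    · rintro ⟨hpre, hrest⟩
      refine ⟨hpre, ?_⟩
      rcases hrest with heq | ⟨c, hc, h60, h90⟩
      · omega
      · rw [Nat.add_comm i, List.getElem?_eq_getElem hlt] at hc
        simp only [Option.some.injEq] at hc
        subst hc
        simpa using And.intro h60 h90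
  · rw [hslice]
    have hge : string.toList.length ≤ d.toList.length + i := by
      rw [PySem.Str.len_eq] at h; omega
    constructor
    · intro hpre
      refine ⟨hpre, Or.inl ?_⟩
      have := hpre.length_le
      rw [List.length_drop] at this
      omega
    · exact And.left

lemma vqOuterA_range (lista : List String) (string : String) (a b : Int) :
    vqOuterA lista string a (PySem.List.pyRange a b 1) = true ↔
      ∃ i : Int, a ≤ i ∧ i < b ∧ vqInnerA string i i lista = true := by
  suffices H : ∀ (m : Nat) (a : Int), (b - a).toNat = m →
      (vqOuterA lista string a (PySem.List.pyRange a b 1) = true ↔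
        ∃ i : Int, a ≤ i ∧ i < b ∧ vqInnerA string i i lista = true) from H _ a rfl
  intro m
  induction m with
  | zero =>
    intro a hm
    have hr : PySem.List.pyRange a b 1 = [] := by
      rw [PySem.List.pyRange_one]; rw [hm]; rfl
    rw [hr]
    simp only [vqOuterA]
    constructor
    · intro h; exact absurd h (by simp)
    · rintro ⟨i, h1, h2, _⟩; omega
  | succ m ih =>
    intro a hm
    have hab : a < b := by omega
    rw [PySem.List.pyRange_one_cons hab]
    have hstep : vqOuterA lista string a (a :: PySem.List.pyRange (a + 1) b 1) =
        (vqInnerA string a a lista || vqOuterA lista string (a + 1) (PySem.List.pyRange (a + 1) b 1)) := by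
      conv_lhs => rw [vqOuterA]
      split_ifs <;> simp_all
    rw [hstep, Bool.or_eq_true, ih (a + 1) (by omega)]
    constructor
    · rintro (h | ⟨i, h1, h2, h3⟩)
      · exact ⟨a, le_refl _, hab, h⟩
      · exact ⟨i, by omega, h2, h3⟩
    · rintro ⟨i, h1, h2, h3⟩
      rcases eq_or_lt_of_le h1 with rfl | hlt
      · exact Or.inl h3
      · exact Or.inr ⟨i, by omega, h2, h3⟩

lemma vqA_iff (lista : List String) (string : String) :
    verifica_quimicos lista string = true ↔
      ∃ i : Nat, i < string.toList.length ∧ ∃ d ∈ lista, AGood string.toList d.toList i := by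
  unfold verifica_quimicos
  rw [PySem.Str.len_eq, vqOuterA_range]
  constructor
  · rintro ⟨i, h0, hn, hin⟩
    lift i to ℕ using h0
    rw [vqInnerA_iff] at hin
    obtain ⟨d, hd, hc⟩ := hin
    have hi : i < string.toList.length := by exact_mod_cast hn
    exact ⟨i, hi, d, hd, (condA_iff string d i hi).mp hc⟩
  · rintro ⟨j, hj, d, hd, hg⟩
    refine ⟨(j : Int), by positivity, by exact_mod_cast hj, ?_⟩
    rw [vqInnerA_iff]
    exact ⟨d, hd, (condA_iff string d j hj).mpr hg⟩

lemma mem_terminators (c : Char) : c ∈ vqTerminators ↔ 60 ≤ c.toNat ∧ c.toNat ≤ 90 := by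
  unfold vqTerminators
  rw [PySem.List.pyRange_one]
  constructor
  · intro h
    simp only [List.map_map, List.mem_map, List.mem_range] at h
    obtain ⟨k, hk, rfl⟩ := h
    have hk31 : k < 31 := by omega
    clear hk
    interval_cases k <;> simp
  · rintro ⟨h1, h2⟩
    simp only [List.map_map, List.mem_map, List.mem_range]
    refine ⟨c.toNat - 60, by omega, ?_⟩
    have he : ((60 : Int) + ↑(c.toNat - 60)).toNat = c.toNat := by omega
    simp [Function.comp, he, Char.ofNat_toNat]

lemma vqTermLoop_iff (string d : String) (ts : List Char) :
    vqTermLoop string d ts = true ↔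
      ∃ c ∈ ts, PySem.Str.isIn (d ++ String.singleton c) string = true := by
  induction ts with
  | nil => simp [vqTermLoop]
  | cons c cs ih =>
    conv_lhs => rw [vqTermLoop]
    split_ifs <;> simp_all

lemma condB_iff (string d : String) :
    ((d ≠ "" && PySem.Str.endswith string d) || vqTermLoop string d vqTerminators) = true ↔
      ∃ i : Nat, i < string.toList.length ∧ AGood string.toList d.toList i := by
  rw [Bool.or_eq_true, Bool.and_eq_true, vqTermLoop_iff]
  constructor
  · rintro (⟨hne, hend⟩ | ⟨c, hc, hin⟩)
    · rw [PySem.Str.endswith_eq, PySem.Chars.endswith_iff] at hend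
      obtain ⟨t, ht⟩ := hend
      have hdne : d.toList ≠ [] := by
        simp only [decide_eq_true_eq] at hne
        intro hcon
        exact hne (String.ext hcon)
      refine ⟨t.length, ?_, ?_, Or.inl ?_⟩
      · rw [← ht, List.length_append]
        have := List.length_pos_iff.mpr hdne
        omega
      · rw [← ht, List.drop_left]
      · rw [← ht]; simp
    · obtain ⟨hc60, hc90⟩ := (mem_terminators c).mp hc
      rw [PySem.Str.isIn_eq] at hin
      obtain ⟨j, hj⟩ := (PySem.Chars.exists_prefix_drop_iff_isIn _ _).mpr hin
      rw [show (d ++ String.singleton c).toList = d.toList ++ [c] by simp] at hj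
      rw [prefix_snoc_iff] at hj
      obtain ⟨hpre, hget⟩ := hj
      rw [List.getElem?_drop] at hget
      have hjn : j + d.toList.length < string.toList.length := by
        by_contra hcon
        rw [List.getElem?_eq_none (by omega)] at hget
        exact absurd hget (by simp)
      exact ⟨j, by omega, hpre, Or.inr ⟨c, hget, hc60, hc90⟩⟩
  · rintro ⟨i, hi, hpre, hrest⟩
    rcases hrest with heq | ⟨c, hc, h60, h90⟩
    · left
      have hlen : (string.toList.drop i).length = d.toList.length := by
        rw [List.length_drop]; omega
      have hdrop : string.toList.drop i = d.toList := (hpre.eq_of_length hlen.symm).symm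
      constructor
      · simp only [decide_eq_true_eq]
        intro hcon
        have hnil : d.toList = [] := by rw [hcon]; rfl
        rw [hnil] at heq
        simp only [List.length_nil, Nat.add_zero] at heq
        omega
      · rw [PySem.Str.endswith_eq, PySem.Chars.endswith_iff, ← hdrop]
        exact List.drop_suffix i string.toList
    · right
      refine ⟨c, (mem_terminators c).mpr ⟨h60, h90⟩, ?_⟩
      rw [PySem.Str.isIn_eq]
      refine (PySem.Chars.exists_prefix_drop_iff_isIn _ _).mp ⟨i, ?_⟩
      rw [show (d ++ String.singleton c).toList = d.toList ++ [c] by simp]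
      rw [prefix_snoc_iff, List.getElem?_drop]
      exact ⟨hpre, hc⟩

lemma vqB_iff (lista : List String) (string : String) :
    verifica_quimicos_alt lista string = true ↔
      ∃ d ∈ lista, ∃ i : Nat, i < string.toList.length ∧ AGood string.toList d.toList i := by
  unfold verifica_quimicos_alt
  induction lista with
  | nil => simp [vqOuterB]
  | cons d ds ih =>
    have hstep : vqOuterB string (d :: ds) =
        (((d ≠ "" && PySem.Str.endswith string d) || vqTermLoop string d vqTerminators) ||
          vqOuterB string ds) := by
      conv_lhs => rw [vqOuterB]
      split_ifs <;> simp_all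
    rw [hstep, Bool.or_eq_true, condB_iff, ih]
    simp only [List.mem_cons]
    constructor
    · rintro (h | ⟨d', hd', h⟩)
      · exact ⟨d, Or.inl rfl, h⟩
      · exact ⟨d', Or.inr hd', h⟩
    · rintro ⟨d', hd' | hd', h⟩
      · subst hd'; exact Or.inl h
      · exact Or.inr ⟨d', hd', h⟩

-- ===== VERDICT (by name: the statement is the Claim_ definition above) =====
theorem verifica_quimicos_spec : Claim_equal_verifica_quimicos := by
  intro lista string _
  unfold Spec_verifica_quimicos
  rw [Bool.eq_iff_iff, vqA_iff, vqB_iff]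
  constructor
  · rintro ⟨i, hi, d, hd, hg⟩; exact ⟨d, hd, i, hi, hg⟩
  · rintro ⟨d, hd, i, hi, hg⟩; exact ⟨i, hi, d, hd, hg⟩
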